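-- pv_equiv track=rewrite | github.com/honey-lee/Algorithm---Programmers | Python - Level2/메뉴 리뉴얼/메뉴 리뉴얼.py | solution
-- ===== SOURCE A (Python) =====
-- from itertools import combinations
-- from collections import Counter
--
-- def find_max(menus: list) -> str:
--     counter = Counter(menus).most_common()
--     max_count = counter[0][1]
--     max_menu = []
--
--     if max_count >= 2:
--         for c in counter:
--             if c[1] == max_count:
--                 max_menu.append(c[0])
--             else:
--                 break
--
--     return max_menu
--
-- def solution(orders: list, course: list) -> list:
--     n_orders = []
--     for order in orders:
--         n_orders.append(sorted(order))
--     ans = []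
--     result = []
--     for j in course:
--         tmp = []
--         for i in range(len(n_orders)):
--             tmp2 = combinations(n_orders[i], j)
--             for k in tmp2:
--                 tmp.append(k)
--         if tmp:
--             ans.append(find_max(tmp))
--
--     for i in ans:
--         for j in i:
--             result.append(''.join(j))
--
--     return sorted(result)
-- ===== SOURCE B (Python) =====
-- def _combs(chars, j):
--     # all j-element combinations of chars (by position), lexicographic by index
--     if j == 0:
--         return [()]
--     if not chars:
--         return []
--     head, rest = chars[0], chars[1:]
--     return [(head,) + t for t in _combs(rest, j - 1)] + _combs(rest, j)
--
--
-- def solution(orders: list, course: list) -> list: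
--     result = []
--     for j in course:
--         counts = {}
--         for order in orders:
--             for comb in _combs(sorted(order), j):
--                 counts[comb] = counts.get(comb, 0) + 1
--         if counts:
--             m = max(counts.values())
--             if m >= 2:
--                 result.extend(''.join(k) for k, c in counts.items() if c == m)
--     return sorted(result)
-- ===== Notes on version B (the rewrite author's own statement) =====
-- stated objective: simpler
-- what changed: B streams combination counts into one dict per course size and selects maximal keys with a max scan plus a filter (hand-rolled recursive combinations), instead of A's materialise-all-combinations list, Counter.most_common() sort and break-at-first-lower-count walk.
import Mathlib
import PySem

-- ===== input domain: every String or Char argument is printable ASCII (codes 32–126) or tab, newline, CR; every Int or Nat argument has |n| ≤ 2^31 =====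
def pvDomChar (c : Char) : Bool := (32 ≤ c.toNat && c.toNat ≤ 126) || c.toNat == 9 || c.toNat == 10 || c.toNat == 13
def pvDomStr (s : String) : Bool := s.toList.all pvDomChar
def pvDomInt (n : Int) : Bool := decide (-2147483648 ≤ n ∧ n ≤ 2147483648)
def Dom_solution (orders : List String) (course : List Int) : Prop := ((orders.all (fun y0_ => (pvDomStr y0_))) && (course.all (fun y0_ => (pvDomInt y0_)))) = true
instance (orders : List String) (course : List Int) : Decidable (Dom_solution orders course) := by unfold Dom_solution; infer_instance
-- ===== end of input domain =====

-- B replaces A's collect-all-then-Counter.most_common (a sort) selection by streaming counts into one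
-- dict per course size and selecting the maximal keys with a max scan plus a filter (objective: simpler).

-- ===== PORT A =====
-- A's 'for c in counter: if c[1]==max_count: append else break' loop
def findMaxWalk (maxCount : Int) : List (List Char × Int) → List (List Char)
  | [] => []
  | c :: rest => if c.2 = maxCount then c.1 :: findMaxWalk maxCount rest else []

-- port of find_max; Counter(menus).most_common() = items sorted by count, reverse, stable.
-- menus ≠ [] at every call site (guarded by 'if tmp:'), so the [] branch (Python: IndexError) is unreachable.
def findMax (menus : List (List Char)) : List (List Char) :=
  let counter := PySem.List.sorted (PySem.Dict.counter menus).items (fun c => c.2) true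
  match counter with
  | [] => []
  | c0 :: _ =>
    let maxCount := c0.2
    if maxCount ≥ 2 then findMaxWalk maxCount counter else []

-- port of A; itertools.combinations is PySem.List.combinations (index-lexicographic order).
-- j.toNat: Pre_solution guarantees 0 ≤ j whenever combinations is reached (negative j raises ValueError in Python).
def solution (orders : List String) (course : List Int) : List String :=
  let nOrders := orders.foldl (fun acc order => acc ++ [PySem.List.sorted order.toList (fun c => c) false]) []
  let ans := course.foldl (fun ans j =>
      let tmp := (PySem.List.pyRange 0 (nOrders.length : Int) 1).foldl
          (fun tmp i => tmp ++ PySem.List.combinations (PySem.List.pyGetD nOrders i []) j.toNat) []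
      if tmp ≠ [] then ans ++ [findMax tmp] else ans) []
  let result := ans.foldl (fun result i => i.foldl (fun result j => result ++ [String.ofList j]) result) []
  PySem.List.sorted result (fun s => s) false

-- ===== PORT B =====
-- port of Source B's _combs (hand-written recursion; for j < 0 it returns [])
def combsAlt (chars : List Char) (j : Int) : List (List Char) :=
  match chars with
  | [] => if j = 0 then [[]] else []
  | head :: rest =>
    if j = 0 then [[]]
    else ((combsAlt rest (j - 1)).map (fun t => head :: t)) ++ combsAlt rest j

def solution_alt (orders : List String) (course : List Int) : List String :=
  let result := course.foldl (fun result j =>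
      let counts := orders.foldl (fun counts order =>
          (combsAlt (PySem.List.sorted order.toList (fun c => c) false) j).foldl
            (fun counts comb => counts.insert comb (counts.getD comb 0 + 1)) counts)
        (PySem.Dict.empty : PySem.Dict (List Char) Int)
      if counts.items ≠ [] then
        match PySem.List.max? counts.values (fun v => v) with
        | none => result  -- unreachable: counts is nonempty here
        | some m =>
          if m ≥ 2 then
            result ++ (counts.items.filter (fun kc => kc.2 == m)).map (fun kc => String.ofList kc.1)
          else result
      else result) []
  PySem.List.sorted result (fun s => s) false

-- ===== PRECONDITION & SPEC =====
-- Pre_ excludes exactly the inputs where A raises: a negative course size reaches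
-- itertools.combinations (ValueError) as soon as orders is nonempty.
def Pre_solution (orders : List String) (course : List Int) : Prop :=
  orders = [] ∨ ∀ j ∈ course, 0 ≤ j
instance (orders : List String) (course : List Int) : Decidable (Pre_solution orders course) := by unfold Pre_solution; infer_instance

def pvWitness_solution : List String × List Int := (["ab", "ab"], [2])

def Spec_solution (orders : List String) (course : List Int) (out : List String) : Prop := out = solution_alt orders course
instance (orders : List String) (course : List Int) (out : List String) : Decidable (Spec_solution orders course out) := by unfold Spec_solution; infer_instance

-- ===== CLAIM (what is proved, stated in full; the proofs are below) =====
def Claim_equal_solution : Prop := ∀ (orders : List String) (course : List Int), Dom_solution orders course → Pre_solution orders course → Spec_solution orders course (solution orders course)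

-- ===== LEMMAS AND PROOFS =====

-- the combination pool for size j, shared by both normal forms
def menusOf (orders : List String) (j : Int) : List (List Char) :=
  orders.flatMap (fun o => PySem.List.combinations (PySem.List.sorted o.toList (fun c => c) false) j.toNat)

def contribA (orders : List String) (j : Int) : List String :=
  if menusOf orders j = [] then [] else (findMax (menusOf orders j)).map String.ofList

def contribB (orders : List String) (j : Int) : List String :=
  let counts := PySem.Dict.counter (menusOf orders j)
  if counts.items = [] then []
  else match PySem.List.max? counts.values (fun v => v) with
    | none => []
    | some m =>
      if m ≥ 2 then (counts.items.filter (fun kc => kc.2 == m)).map (fun kc => String.ofList kc.1)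
      else []

theorem combsAlt_of_nonneg (chars : List Char) (j : Int) (hj : 0 ≤ j) :
    combsAlt chars j = PySem.List.combinations chars j.toNat := by
  induction chars generalizing j with
  | nil =>
    by_cases h : j = 0
    · subst h; rfl
    · have ht : j.toNat = (j - 1).toNat + 1 := by omega
      rw [ht, PySem.List.combinations_nil_succ]
      simp only [combsAlt]
      rw [if_neg h]
  | cons c rest ih =>
    by_cases h : j = 0
    · subst h; rw [Int.toNat_zero, PySem.List.combinations_zero]; rfl
    · have ht : j.toNat = (j - 1).toNat + 1 := by omega
      rw [ht, PySem.List.combinations_cons_succ, ← ht]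
      simp only [combsAlt]
      rw [if_neg h, ih (j - 1) (by omega), ih j hj, ht]

theorem foldl_foldl_eq_flatMap_foldl {α β γ : Type} (l : List α) (g : α → List β)
    (f : γ → β → γ) (init : γ) :
    l.foldl (fun d x => (g x).foldl f d) init = (l.flatMap g).foldl f init := by
  induction l generalizing init with
  | nil => rfl
  | cons a t ih => simp [List.flatMap_cons, List.foldl_append, ih]

theorem solutionA_norm (orders : List String) (course : List Int) :
    solution orders course =
      PySem.List.sorted (course.flatMap (contribA orders)) (fun s => s) false := by
  unfold solution
  simp only [PySem.List.foldl_append_singleton_eq_map, List.nil_append]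
  rw [PySem.List.foldl_congr_mem course _
      (fun ans j => ans ++ (if menusOf orders j = [] then [] else [findMax (menusOf orders j)])) []
      ?hbody]
  case hbody =>
    intro acc j _
    simp only []
    rw [PySem.List.foldl_pyRange_zero_pyGetD'
        (orders.map (fun o => PySem.List.sorted o.toList (fun c => c) false)) []
        (fun acc o => acc ++ PySem.List.combinations o j.toNat) []]
    rw [PySem.List.foldl_append_eq_flatMap, List.nil_append]
    have hm : (orders.map (fun o => PySem.List.sorted o.toList (fun c => c) false)).flatMap
        (fun o => PySem.List.combinations o j.toNat) = menusOf orders j := by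
      simp [menusOf, List.flatMap_map]
    rw [hm]
    by_cases h : menusOf orders j = [] <;> simp [h]
  rw [PySem.List.foldl_append_eq_flatMap, List.nil_append]
  rw [PySem.List.foldl_append_eq_flatMap, List.nil_append, List.flatMap_assoc]
  have h : ∀ j : Int,
      ((if menusOf orders j = [] then [] else [findMax (menusOf orders j)]).flatMap
        (fun i => i.map String.ofList)) = contribA orders j := by
    intro j
    by_cases h : menusOf orders j = [] <;> simp [contribA, h]
  simp only [h]

theorem solutionB_norm (orders : List String) (course : List Int)
    (hc : ∀ j ∈ course, orders = [] ∨ 0 ≤ j) :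
    solution_alt orders course =
      PySem.List.sorted (course.flatMap (contribB orders)) (fun s => s) false := by
  unfold solution_alt
  rw [PySem.List.foldl_congr_mem course _ (fun result j => result ++ contribB orders j) [] ?hbody]
  case hbody =>
    intro acc j hj
    simp only []
    have hmenus : orders.flatMap (fun o => combsAlt (PySem.List.sorted o.toList (fun c => c) false) j)
        = menusOf orders j := by
      rcases hc j hj with h | h
      · simp [h, menusOf]
      · unfold menusOf
        congr 1
        funext o
        exact combsAlt_of_nonneg _ j h
    rw [@foldl_foldl_eq_flatMap_foldl String (List Char) (PySem.Dict (List Char) Int) orders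
        (fun o => combsAlt (PySem.List.sorted o.toList (fun c => c) false) j)
        (fun counts comb => counts.insert comb (counts.getD comb 0 + 1)) PySem.Dict.empty,
      hmenus, PySem.Dict.foldl_insert_getD_add_one_eq_counter]
    unfold contribB
    simp only []
    by_cases hi : (PySem.Dict.counter (menusOf orders j)).items = []
    · simp [hi]
    · simp only [hi, if_neg, ne_eq, not_false_iff, if_true]
      cases hmax : PySem.List.max? (PySem.Dict.counter (menusOf orders j)).values (fun v => v) with
      | none => simp
      | some m =>
        by_cases hm : m ≥ 2
        · simp [hm]
        · simp [hm]
  rw [PySem.List.foldl_append_eq_flatMap, List.nil_append]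

theorem walk_eq_filter (m : Int) (l : List (List Char × Int))
    (hpw : l.Pairwise (fun a b => b.2 ≤ a.2)) (hub : ∀ x ∈ l, x.2 ≤ m) :
    findMaxWalk m l = (l.filter (fun kc => kc.2 == m)).map (·.1) := by
  induction l with
  | nil => simp [findMaxWalk]
  | cons a t ih =>
    rcases List.pairwise_cons.mp hpw with ⟨ha, hpt⟩
    by_cases he : a.2 = m
    · simp [findMaxWalk, he, ih hpt (fun x hx => hub x (List.mem_cons_of_mem _ hx))]
    · have hnone : ∀ x ∈ t, ¬ ((x.2 == m) = true) := by
        intro x hx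
        have h1 := ha x hx
        have h2 := hub a (List.mem_cons_self)
        simp only [beq_iff_eq]
        omega
      simp [findMaxWalk, he, List.filter_eq_nil_iff.mpr hnone]

theorem contrib_perm (orders : List String) (j : Int) :
    (contribA orders j).Perm (contribB orders j) := by
  unfold contribA contribB
  simp only []
  by_cases hm : menusOf orders j = []
  · simp [hm, PySem.Dict.items_counter]
  · have hitems : (PySem.Dict.counter (menusOf orders j)).items ≠ [] := by
      rw [PySem.Dict.items_counter]
      intro h
      rcases List.exists_mem_of_ne_nil _ hm with ⟨a, ha⟩
      have hmem : a ∈ PySem.Set.ofList (menusOf orders j) := (PySem.Set.mem_ofList _ _).mpr ha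
      rw [List.map_eq_nil_iff.mp h] at hmem
      exact absurd hmem (List.not_mem_nil)
    rw [if_neg hm, if_neg hitems]
    unfold findMax
    simp only []
    cases hmc : PySem.List.sorted (PySem.Dict.counter (menusOf orders j)).items (fun c => c.2) true with
    | nil => exact absurd ((PySem.List.sorted_eq_nil_iff _ _ _).mp hmc) hitems
    | cons c0 rest =>
      have hvals : (PySem.Dict.counter (menusOf orders j)).values
          = (PySem.Dict.counter (menusOf orders j)).items.map (·.2) := rfl
      cases hmax : PySem.List.max? (PySem.Dict.counter (menusOf orders j)).values (fun v => v) with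
      | none =>
        have := (PySem.List.max?_eq_none_iff _ _).mp hmax
        rw [hvals] at this
        exact absurd (List.map_eq_nil_iff.mp this) hitems
      | some m =>
        dsimp only []
        have hc0 : c0 ∈ (PySem.Dict.counter (menusOf orders j)).items :=
          (PySem.List.mem_sorted _ _ _ _).mp (hmc ▸ List.mem_cons_self)
        have hMm : c0.2 = m := by
          have h2 : c0.2 ∈ (PySem.Dict.counter (menusOf orders j)).values := by
            rw [hvals]; exact List.mem_map_of_mem hc0
          have h3 := PySem.List.max?_isMax hmax c0.2 h2
          have h4 := PySem.List.max?_mem hmax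
          rw [hvals] at h4
          rcases List.mem_map.mp h4 with ⟨p, hp, hpe⟩
          have h6 := PySem.List.key_head_sorted_rev_ge _ _ hmc p hp
          simp only [] at h3 h6
          omega
        rw [hMm]
        by_cases h2 : m ≥ 2
    -- main branch: A walks the count-sorted items, B filters the items; the two are permutations
        · rw [if_pos h2, if_pos h2]
          have hub : ∀ x ∈ c0 :: rest, x.2 ≤ c0.2 := by
            intro x hx
            exact PySem.List.key_head_sorted_rev_ge _ _ hmc x
              ((PySem.List.mem_sorted _ _ _ _).mp (hmc ▸ hx))
          rw [← hMm, walk_eq_filter c0.2 (c0 :: rest) (hmc ▸ PySem.List.sorted_pairwise_rev _ _) hub]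
          have hperm : ((c0 :: rest).filter (fun kc => kc.2 == c0.2)).Perm
              ((PySem.Dict.counter (menusOf orders j)).items.filter (fun kc => kc.2 == c0.2)) :=
            (hmc ▸ PySem.List.sorted_perm _ _ true).filter _
          have hfinal := (hperm.map (·.1)).map String.ofList
          simp only [List.map_map] at hfinal ⊢
          exact hfinal
        · rw [if_neg h2, if_neg h2]
          simp

theorem flatMap_perm (course : List Int) (f g : Int → List String)
    (h : ∀ j ∈ course, (f j).Perm (g j)) :
    (course.flatMap f).Perm (course.flatMap g) := by
  induction course with
  | nil => simp
  | cons j t ih =>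
    simp only [List.flatMap_cons]
    exact (h j (by simp)).append (ih (fun x hx => h x (List.mem_cons_of_mem _ hx)))

-- ===== VERDICT (by name: the statement is the Claim_ definition above) =====
theorem solution_spec : Claim_equal_solution := by
  intro orders course _ hpre
  unfold Spec_solution
  rw [solutionA_norm, solutionB_norm orders course (fun j hj => hpre.imp id (fun h => h j hj))]
  exact PySem.List.sorted_eq_sorted_of_perm _ _ _ (fun a b h => h)
    (flatMap_perm course _ _ (fun j _ => contrib_perm orders j))
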